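-- pv_equiv track=rewrite | github.com/jbsam2/algo_problem | programmers/문자열의아름다움.py | solution
-- ===== SOURCE A (Python) =====
-- def solution(s):
--     l = len(s)
--     allsum = [[0]*(len(s)+1) for i in range(26)]
--     allcnt = [[0]*(len(s)+1) for i in range(26)]
--     prev = '0'
--     cnt = 0
--     res = 0
--     for i,c in enumerate(s):
--         k = int(i*(i+1)/2)
--         if prev == c:
--             cnt+=1
--         else:
--             prev = c
--             cnt = 1
--         ii = ord(c)-ord('a')
--
--         idx = cnt
--
--         while idx:
--             k -= allsum[ii][idx]
--             k += cnt*allcnt[ii][idx]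
--             idx -= idx&-idx
--
--         idx = l
--         while idx:
--             k -= cnt*allcnt[ii][idx]
--             idx -= idx&-idx
--
--         idx = cnt
--         while idx <= l:
--             allsum[ii][idx]+=cnt
--             allcnt[ii][idx]+=1
--             idx += idx&-idx
--         res += k
--     return res
-- ===== SOURCE B (Python) =====
-- def solution(s):
--     per = [[] for _ in range(26)]
--     prev = ''
--     cnt = 0
--     res = 0
--     for i, c in enumerate(s):
--         cnt = cnt + 1 if c == prev else 1
--         prev = c
--         runs = per[ord(c) - ord('a')]
--         res += i * (i + 1) // 2 - sum(min(x, cnt) for x in runs)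
--         runs.append(cnt)
--     return res
-- ===== Notes on version B (the rewrite author's own statement) =====
-- stated objective: simpler
-- what changed: Replaces the two per-letter Fenwick (BIT) arrays and their idx&-idx prefix-query/update loops with a plain per-letter list of previous run lengths, adding i*(i+1)//2 minus sum(min(x, cnt)) over that list at each position.
import Mathlib
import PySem

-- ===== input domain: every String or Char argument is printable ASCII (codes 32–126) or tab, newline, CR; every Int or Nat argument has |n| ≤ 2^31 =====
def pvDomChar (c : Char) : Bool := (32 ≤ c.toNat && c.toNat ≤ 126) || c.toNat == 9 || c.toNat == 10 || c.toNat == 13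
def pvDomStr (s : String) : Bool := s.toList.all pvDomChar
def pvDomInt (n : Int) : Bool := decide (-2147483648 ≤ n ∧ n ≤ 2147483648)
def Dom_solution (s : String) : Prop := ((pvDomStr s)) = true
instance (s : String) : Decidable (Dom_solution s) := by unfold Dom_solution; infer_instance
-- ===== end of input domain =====

-- B replaces A's per-letter Fenwick trees by a plain per-letter list of previous run
-- lengths (simpler, no bit tricks); same return value on every input A accepts.

-- ===== PORT A =====

-- idx & -idx (lowest set bit) of a nonnegative Python int, by binary recursion; exact for idx ≥ 0.
def pvLowbit : Nat → Nat
  | 0 => 0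
  | n + 1 => if (n + 1) % 2 = 1 then 1 else 2 * pvLowbit ((n + 1) / 2)
decreasing_by omega

theorem pvLowbit_pos (n : Nat) (h : 0 < n) : 0 < pvLowbit n := by
  obtain ⟨m, rfl⟩ : ∃ m, n = m + 1 := ⟨n - 1, by omega⟩
  unfold pvLowbit
  split
  · omega
  · have : 0 < pvLowbit ((m + 1) / 2) := pvLowbit_pos ((m + 1) / 2) (by omega)
    omega
decreasing_by omega

-- while idx: k -= allsum[ii][idx]; k += cnt*allcnt[ii][idx]; idx -= idx & -idx
def pvLoop1 (asum acnt : List Int) (cnt : Int) (idx : Nat) (k : Int) : Int :=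
  if h : idx = 0 then k
  else pvLoop1 asum acnt cnt (idx - pvLowbit idx) (k - asum.getD idx 0 + cnt * acnt.getD idx 0)
termination_by idx
decreasing_by have := pvLowbit_pos idx (by omega); omega

-- while idx: k -= cnt*allcnt[ii][idx]; idx -= idx & -idx
def pvLoop2 (acnt : List Int) (cnt : Int) (idx : Nat) (k : Int) : Int :=
  if h : idx = 0 then k
  else pvLoop2 acnt cnt (idx - pvLowbit idx) (k - cnt * acnt.getD idx 0)
termination_by idx
decreasing_by have := pvLowbit_pos idx (by omega); omega

-- while idx <= l: allsum[ii][idx] += cnt; allcnt[ii][idx] += 1; idx += idx & -idx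
-- (the guard 1 ≤ idx only makes the recursion total; on reachable states idx ≥ 1 always)
def pvLoop3 (l : Nat) (v : Int) (idx : Nat) (asum acnt : List Int) : List Int × List Int :=
  if h : 1 ≤ idx ∧ idx ≤ l then
    pvLoop3 l v (idx + pvLowbit idx)
      (asum.set idx (asum.getD idx 0 + v)) (acnt.set idx (acnt.getD idx 0 + 1))
  else (asum, acnt)
termination_by l + 1 - idx
decreasing_by have := pvLowbit_pos idx (by omega); omega

-- the for-loop of A over enumerate(s); allsum/allcnt rows fetched/stored with Python
-- (possibly negative) indexing: Python raises IndexError when ii is out of range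
-- (some character outside 'G'..'z'), excluded by Pre_; the .getD [] never fires there.
def pvGo (l : Nat) : List Char → Nat → List (List Int) → List (List Int) → Char → Int → Int → Int
  | [], _, _, _, _, _, res => res
  | c :: rest, i, allsum, allcnt, prev, cnt, res =>
    -- int(i*(i+1)/2): i*(i+1) is even, so the float halving is the integer quotient (exact below 2^53)
    let k0 : Int := ((i : Int) * ((i : Int) + 1)) / 2
    let cnt' : Int := if prev = c then cnt + 1 else 1
    let ii : Int := (c.toNat : Int) - 97
    let asum := (PySem.List.pyGet? allsum ii).getD []
    let acnt := (PySem.List.pyGet? allcnt ii).getD []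
    let k1 := pvLoop1 asum acnt cnt' cnt'.toNat k0
    let k2 := pvLoop2 acnt cnt' l k1
    let p := pvLoop3 l cnt' cnt'.toNat asum acnt
    pvGo l rest (i + 1) (PySem.List.pySetD allsum ii p.1) (PySem.List.pySetD allcnt ii p.2) c cnt' (res + k2)

def solution (s : String) : Int :=
  let cs := s.toList
  pvGo cs.length cs 0
    (List.replicate 26 (List.replicate (cs.length + 1) 0))
    (List.replicate 26 (List.replicate (cs.length + 1) 0)) '0' 0 0

-- ===== PORT B =====

-- the for-loop of B: per[ord(c)-97] is the list of previous run lengths of this letter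
-- (Python negative indexing for 'G'..'`', IndexError outside 'G'..'z' — excluded by Pre_).
def pvGoB : List Char → Nat → List (List Int) → Char → Int → Int → Int
  | [], _, _, _, _, res => res
  | c :: rest, i, per, prev, cnt, res =>
    let cnt' : Int := if c = prev then cnt + 1 else 1
    let ii : Int := (c.toNat : Int) - 97
    let runs := (PySem.List.pyGet? per ii).getD []
    let res' := res + ((i : Int) * ((i : Int) + 1)) / 2 - (runs.map (fun x => min x cnt')).sum
    pvGoB rest (i + 1) (PySem.List.pySetD per ii (runs ++ [cnt'])) c cnt' res'

-- prev = '' is ported as the NUL character: under Pre_ no character of s can equal either sentinel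
def solution_alt (s : String) : Int :=
  pvGoB s.toList 0 (List.replicate 26 []) (Char.ofNat 0) 0 0

-- ===== PRECONDITION & SPEC =====

-- Pre_: every character lies in 'G'..'z' (codes 71–122); on any other character BOTH
-- programs raise IndexError (row index ord(c)-97 outside [-26, 25] of a 26-element list).
def Pre_solution (s : String) : Prop :=
  (s.toList.all (fun c => 71 ≤ c.toNat && c.toNat ≤ 122)) = true
instance (s : String) : Decidable (Pre_solution s) := by unfold Pre_solution; infer_instance

def pvWitness_solution : String := ""

def Spec_solution (s : String) (out : Int) : Prop := out = solution_alt s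
instance (s : String) (out : Int) : Decidable (Spec_solution s out) := by unfold Spec_solution; infer_instance

-- ===== CLAIM (what is proved, stated in full; the proofs are below) =====
def Claim_equal_solution : Prop := ∀ (s : String), Dom_solution s → Pre_solution s → Spec_solution s (solution s)

-- ===== LEMMAS AND PROOFS =====

theorem pvLowbit_le (n : Nat) : pvLowbit n ≤ n := by
  match n with
  | 0 => simp [pvLowbit]
  | m + 1 =>
    unfold pvLowbit
    split
    · omega
    · have := pvLowbit_le ((m + 1) / 2)
      omega
decreasing_by omega

theorem pvLowbit_odd (n : Nat) (h : n % 2 = 1) : pvLowbit n = 1 := by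
  obtain ⟨m, rfl⟩ : ∃ m, n = m + 1 := ⟨n - 1, by omega⟩
  unfold pvLowbit
  simp [h]

theorem pvLowbit_even (n : Nat) (h1 : 1 ≤ n) (h : n % 2 = 0) :
    pvLowbit n = 2 * pvLowbit (n / 2) := by
  obtain ⟨m, rfl⟩ : ∃ m, n = m + 1 := ⟨n - 1, by omega⟩
  conv_lhs => rw [pvLowbit]
  simp [show ¬ (m + 1) % 2 = 1 by omega]

theorem pvLowbit_two_mul (m : Nat) : pvLowbit (2 * m) = 2 * pvLowbit m := by
  match m with
  | 0 => simp [pvLowbit]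
  | k + 1 =>
    rw [pvLowbit_even (2 * (k + 1)) (by omega) (by omega)]
    congr 1
    congr 1
    omega

theorem pvLowbit_even_sub (n : Nat) (h : 1 ≤ n) : 2 ∣ (n - pvLowbit n) := by
  rcases Nat.even_or_odd n with he | ho
  · obtain ⟨m, rfl⟩ : ∃ m, n = 2 * m := by obtain ⟨m, hm⟩ := he; exact ⟨m, by omega⟩
    rw [pvLowbit_two_mul]
    have := pvLowbit_le m
    omega
  · rw [pvLowbit_odd n (Nat.odd_iff.mp ho)]
    obtain ⟨m, rfl⟩ := ho
    omega

theorem pvL4 (j : Nat) : ∀ p, 0 < p → p < j → j - pvLowbit j < p → p + pvLowbit p ≤ j := by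
  induction j using Nat.strong_induction_on with
  | _ j IH =>
    intro p hp hpj hlt
    rcases Nat.even_or_odd p with pe | po
    · obtain ⟨a, rfl⟩ : ∃ a, p = 2 * a := by obtain ⟨a, ha⟩ := pe; exact ⟨a, by omega⟩
      rcases Nat.even_or_odd j with je | jo
      · obtain ⟨b, rfl⟩ : ∃ b, j = 2 * b := by obtain ⟨b, hb⟩ := je; exact ⟨b, by omega⟩
        have hlbb := pvLowbit_le b
        have hlba := pvLowbit_le a
        simp only [pvLowbit_two_mul] at hlt ⊢
        have := IH b (by omega) a (by omega) (by omega) (by omega)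
        omega
      · have h1 := pvLowbit_odd j (Nat.odd_iff.mp jo)
        omega
    · rw [pvLowbit_odd p (Nat.odd_iff.mp po)]
      omega

theorem pvC (j : Nat) : ∀ q, 0 < q → q + pvLowbit q ≤ j → j - pvLowbit j < q + pvLowbit q →
    j - pvLowbit j ≤ q - pvLowbit q := by
  induction j using Nat.strong_induction_on with
  | _ j IH =>
    intro q hq hle hlt
    rcases Nat.even_or_odd q with qe | qo
    · obtain ⟨a, rfl⟩ : ∃ a, q = 2 * a := by obtain ⟨a, ha⟩ := qe; exact ⟨a, by omega⟩
      have ha : 0 < a := by omega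
      have hlba := pvLowbit_le a
      have hlbap : 0 < pvLowbit a := pvLowbit_pos a ha
      rcases Nat.even_or_odd j with je | jo
      · obtain ⟨b, rfl⟩ : ∃ b, j = 2 * b := by obtain ⟨b, hb⟩ := je; exact ⟨b, by omega⟩
        have hlbb := pvLowbit_le b
        simp only [pvLowbit_two_mul] at hlt hle ⊢
        have := IH b (by omega) a ha (by omega) (by omega)
        omega
      · have h1 := pvLowbit_odd j (Nat.odd_iff.mp jo)
        simp only [pvLowbit_two_mul] at hlt hle
        have : j % 2 = 1 := Nat.odd_iff.mp jo
        omega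
    · have h1 := pvLowbit_odd q (Nat.odd_iff.mp qo)
      have h2 : 2 ∣ (j - pvLowbit j) := pvLowbit_even_sub j (by omega)
      have h3 : q % 2 = 1 := Nat.odd_iff.mp qo
      omega

def pvW (w : Int → Int) (runs : List Int) (m : Nat) : Int :=
  ((runs.filter (fun x => decide (x ≤ (m : Int)))).map w).sum

def pvTree (w : Int → Int) (l : Nat) (runs : List Int) (t : List Int) : Prop :=
  t.length = l + 1 ∧ ∀ j, 1 ≤ j → j ≤ l → t.getD j 0 = pvW w runs j - pvW w runs (j - pvLowbit j)

theorem pvW_zero (w : Int → Int) (runs : List Int) (hpos : ∀ x ∈ runs, 1 ≤ x) : pvW w runs 0 = 0 := by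
  have h : runs.filter (fun x => decide (x ≤ (0 : Int))) = [] := by
    rw [List.filter_eq_nil_iff]
    intro x hx
    have := hpos x hx
    simp
    omega
  simp only [pvW, Nat.cast_zero, h, List.map_nil, List.sum_nil]

theorem pvW_append (w : Int → Int) (runs : List Int) (v : Int) (m : Nat) :
    pvW w (runs ++ [v]) m = pvW w runs m + (if v ≤ (m : Int) then w v else 0) := by
  simp only [pvW, List.filter_append, List.map_append, List.sum_append]
  congr 1
  by_cases h : v ≤ (m : Int) <;> simp [h]

theorem pvLoop1_eq (l : Nat) (runs asum acnt : List Int) (cnt : Int)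
    (hS : pvTree (fun x => x) l runs asum) (hC : pvTree (fun _ => 1) l runs acnt)
    (hpos : ∀ x ∈ runs, 1 ≤ x) :
    ∀ idx, idx ≤ l → ∀ k, pvLoop1 asum acnt cnt idx k
      = k - pvW (fun x => x) runs idx + cnt * pvW (fun _ => 1) runs idx := by
  intro idx
  induction idx using Nat.strong_induction_on with
  | _ idx IH =>
    intro hidx k
    by_cases h0 : idx = 0
    · subst h0
      rw [pvLoop1, dif_pos rfl, pvW_zero _ _ hpos, pvW_zero _ _ hpos]
      ring
    · have hlb := pvLowbit_pos idx (by omega)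
      have hlble := pvLowbit_le idx
      rw [pvLoop1, dif_neg h0, IH (idx - pvLowbit idx) (by omega) (by omega),
        hS.2 idx (by omega) hidx, hC.2 idx (by omega) hidx]
      ring

theorem pvLoop2_eq (l : Nat) (runs acnt : List Int) (cnt : Int)
    (hC : pvTree (fun _ => 1) l runs acnt) (hpos : ∀ x ∈ runs, 1 ≤ x) :
    ∀ idx, idx ≤ l → ∀ k, pvLoop2 acnt cnt idx k = k - cnt * pvW (fun _ => 1) runs idx := by
  intro idx
  induction idx using Nat.strong_induction_on with
  | _ idx IH =>
    intro hidx k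
    by_cases h0 : idx = 0
    · subst h0
      rw [pvLoop2, dif_pos rfl, pvW_zero _ _ hpos]
      ring
    · have hlb := pvLowbit_pos idx (by omega)
      have hlble := pvLowbit_le idx
      rw [pvLoop2, dif_neg h0, IH (idx - pvLowbit idx) (by omega) (by omega),
        hC.2 idx (by omega) hidx]
      ring

theorem getD_set_lem {α : Type} (xs : List α) (i j : Nat) (v d : α) (hj : j < xs.length) :
    (xs.set i v).getD j d = if i = j then v else xs.getD j d := by
  rw [List.getD_eq_getElem?_getD, List.getElem?_set]
  split
  · simp_all
  · rw [List.getD_eq_getElem?_getD]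

theorem pvIfStep (q j : Nat) (a b v : Int) (hq : 1 ≤ q) (hb : q = j → b = a + v) :
    (if q = j then b else a)
      + (if q + pvLowbit q ≤ j ∧ j - pvLowbit j < q + pvLowbit q then v else 0)
    = a + (if q ≤ j ∧ j - pvLowbit j < q then v else 0) := by
  have hlbq := pvLowbit_pos q hq
  have hlbqle := pvLowbit_le q
  by_cases hqj : q = j
  · subst hqj
    rw [if_pos rfl, hb rfl, if_neg (by omega), if_pos ⟨le_refl q, by omega⟩]
    ring
  · rw [if_neg hqj]
    by_cases hc : q + pvLowbit q ≤ j ∧ j - pvLowbit j < q + pvLowbit q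
    · have := pvC j q (by omega) hc.1 hc.2
      rw [if_pos hc, if_pos ⟨by omega, by omega⟩]
    · rw [if_neg hc]
      by_cases hc2 : q ≤ j ∧ j - pvLowbit j < q
      · exfalso
        have := pvL4 j q (by omega) (by omega) hc2.2
        omega
      · rw [if_neg hc2]

theorem pvLoop3_get_aux (l : Nat) (v : Int) :
    ∀ n q asum acnt, l + 1 - q ≤ n → 1 ≤ q → asum.length = l + 1 → acnt.length = l + 1 →
      (pvLoop3 l v q asum acnt).1.length = l + 1 ∧ (pvLoop3 l v q asum acnt).2.length = l + 1 ∧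
      ∀ j, j ≤ l →
        (pvLoop3 l v q asum acnt).1.getD j 0
          = asum.getD j 0 + (if q ≤ j ∧ j - pvLowbit j < q then v else 0) ∧
        (pvLoop3 l v q asum acnt).2.getD j 0
          = acnt.getD j 0 + (if q ≤ j ∧ j - pvLowbit j < q then 1 else 0) := by
  intro n
  induction n with
  | zero =>
    intro q asum acnt hn hq hla hlc
    rw [pvLoop3, dif_neg (by omega)]
    refine ⟨hla, hlc, ?_⟩
    intro j hj
    rw [if_neg (by omega), if_neg (by omega)]
    simp
  | succ n IHn =>
    intro q asum acnt hn hq hla hlc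
    by_cases hql : q ≤ l
    · have hlbq := pvLowbit_pos q (by omega)
      have hlbqle := pvLowbit_le q
      rw [pvLoop3, dif_pos ⟨hq, hql⟩]
      obtain ⟨L1, L2, H⟩ := IHn (q + pvLowbit q)
        (asum.set q (asum.getD q 0 + v)) (acnt.set q (acnt.getD q 0 + 1))
        (by omega) (by omega) (by simp [hla]) (by simp [hlc])
      refine ⟨L1, L2, ?_⟩
      intro j hj
      obtain ⟨H1, H2⟩ := H j hj
      rw [H1, H2, getD_set_lem _ _ _ _ _ (by omega), getD_set_lem _ _ _ _ _ (by omega)]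
      exact ⟨pvIfStep q j _ _ v (by omega) (fun h => by rw [h]),
        pvIfStep q j _ _ 1 (by omega) (fun h => by rw [h])⟩
    · rw [pvLoop3, dif_neg (by omega)]
      refine ⟨hla, hlc, ?_⟩
      intro j hj
      rw [if_neg (by omega), if_neg (by omega)]
      simp

theorem pvW_cons (w : Int → Int) (x : Int) (rs : List Int) (m : Nat) :
    pvW w (x :: rs) m = (if x ≤ (m : Int) then w x else 0) + pvW w rs m := by
  simp only [pvW, List.filter_cons]
  by_cases h : x ≤ (m : Int) <;> simp [h]

theorem pvLoop3_tree (l : Nat) (runs asum acnt : List Int) (m : Nat) (hm : 1 ≤ m) (hml : m ≤ l)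
    (hS : pvTree (fun x => x) l runs asum) (hC : pvTree (fun _ => 1) l runs acnt) :
    pvTree (fun x => x) l (runs ++ [(m : Int)]) (pvLoop3 l (m : Int) m asum acnt).1 ∧
    pvTree (fun _ => 1) l (runs ++ [(m : Int)]) (pvLoop3 l (m : Int) m asum acnt).2 := by
  obtain ⟨L1, L2, H⟩ := pvLoop3_get_aux l (m : Int) (l + 1) m asum acnt (by omega) hm hS.1 hC.1
  have hlb := pvLowbit_le
  refine ⟨⟨L1, ?_⟩, ⟨L2, ?_⟩⟩ <;> intro j h1 hj <;> obtain ⟨H1, H2⟩ := H j hj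
  · rw [H1, hS.2 j h1 hj, pvW_append, pvW_append]
    by_cases h2 : m ≤ j - pvLowbit j
    · rw [if_neg (by omega), if_pos (by exact_mod_cast (by omega : m ≤ j)),
        if_pos (by exact_mod_cast h2)]
      ring
    · by_cases h3 : m ≤ j
      · rw [if_pos ⟨h3, by omega⟩, if_pos (by exact_mod_cast h3), if_neg (by exact_mod_cast h2)]
        ring
      · rw [if_neg (by omega), if_neg (by exact_mod_cast h3), if_neg (by exact_mod_cast (by omega : ¬ m ≤ j - pvLowbit j))]
        ring
  · rw [H2, hC.2 j h1 hj, pvW_append, pvW_append]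
    by_cases h2 : m ≤ j - pvLowbit j
    · rw [if_neg (by omega), if_pos (by exact_mod_cast (by omega : m ≤ j)),
        if_pos (by exact_mod_cast h2)]
      ring
    · by_cases h3 : m ≤ j
      · rw [if_pos ⟨h3, by omega⟩, if_pos (by exact_mod_cast h3), if_neg (by exact_mod_cast h2)]
        ring
      · rw [if_neg (by omega), if_neg (by exact_mod_cast h3), if_neg (by exact_mod_cast (by omega : ¬ m ≤ j - pvLowbit j))]
        ring

theorem pvSumMin (runs : List Int) (l m : Nat) (hm : 1 ≤ m) (hml : m ≤ l)
    (hb : ∀ x ∈ runs, 1 ≤ x ∧ x ≤ (l : Int)) :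
    (runs.map (fun x => min x (m : Int))).sum
      = pvW (fun x => x) runs m + (m : Int) * (pvW (fun _ => 1) runs l - pvW (fun _ => 1) runs m) := by
  induction runs with
  | nil => simp [pvW]
  | cons x rs IH =>
    have hx := hb x (by simp)
    have hrs := IH (fun y hy => hb y (by simp [hy]))
    simp only [List.map_cons, List.sum_cons, pvW_cons, hrs]
    have hxl : x ≤ ((l : Nat) : Int) := hx.2
    by_cases hxm : x ≤ (m : Int)
    · rw [min_eq_left hxm, if_pos hxm, if_pos hxm, if_pos hxl]
      ring
    · rw [min_eq_right (by omega), if_neg hxm, if_neg hxm, if_pos hxl]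
      ring

def pvRow (c : Char) : Nat := if 97 ≤ c.toNat then c.toNat - 97 else c.toNat - 71

theorem pvRow_lt (c : Char) (h1 : 71 ≤ c.toNat) (h2 : c.toNat ≤ 122) : pvRow c < 26 := by
  unfold pvRow; split <;> omega

theorem pvRowGet {α : Type} (xs : List α) (c : Char) (d : α) (hlen : xs.length = 26)
    (h1 : 71 ≤ c.toNat) (h2 : c.toNat ≤ 122) :
    PySem.List.pyGet? xs ((c.toNat : Int) - 97) = some (xs.getD (pvRow c) d) := by
  unfold pvRow
  by_cases h : 97 ≤ c.toNat
  · rw [if_pos h, PySem.List.pyGet?_of_nonneg xs (by omega)]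
    have he : ((c.toNat : Int) - 97).toNat = c.toNat - 97 := by omega
    rw [he, List.getElem?_eq_getElem (by omega), List.getD_eq_getElem?_getD,
      List.getElem?_eq_getElem (by omega)]
    rfl
  · rw [if_neg h]
    have he : (c.toNat : Int) - 97 = -((97 - c.toNat : Nat) : Int) := by push_cast; omega
    rw [he, PySem.List.pyGet?_neg_natCast xs _ (by omega) (by omega)]
    have h26 : xs.length - (97 - c.toNat) = c.toNat - 71 := by omega
    rw [h26, List.getElem?_eq_getElem (by omega), List.getD_eq_getElem?_getD,
      List.getElem?_eq_getElem (by omega)]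
    rfl

theorem pvRowSet {α : Type} (xs : List α) (v : α) (c : Char) (hlen : xs.length = 26)
    (h1 : 71 ≤ c.toNat) (h2 : c.toNat ≤ 122) :
    PySem.List.pySetD xs ((c.toNat : Int) - 97) v = xs.set (pvRow c) v := by
  unfold pvRow
  by_cases h : 97 ≤ c.toNat
  · rw [if_pos h, PySem.List.pySetD_of_nonneg xs v (by omega)]
    congr 1
    omega
  · rw [if_neg h]
    have hng : ¬ (0 ≤ (c.toNat : Int) - 97) := by omega
    have hge : -(xs.length : Int) ≤ (c.toNat : Int) - 97 := by rw [hlen]; omega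
    simp only [PySem.List.pySetD, PySem.List.pySet?, PySem.List.pyIdx?, if_neg hng,
      if_pos hge, Option.map_some, Option.getD_some]
    congr 1
    omega

theorem pvTree_nil (w : Int → Int) (l : Nat) : pvTree w l [] (List.replicate (l + 1) 0) := by
  refine ⟨by simp, ?_⟩
  intro j h1 hj
  rw [List.getD_eq_getElem?_getD, List.getElem?_replicate]
  simp [pvW, hj]

theorem pvGo_eq (l : Nat) : ∀ (rest : List Char) (i : Nat) (per allsum allcnt : List (List Int))
    (prevA prevB : Char) (cnt res : Int),
    i + rest.length = l →
    (∀ c ∈ rest, 71 ≤ c.toNat ∧ c.toNat ≤ 122) →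
    (∀ c ∈ rest, (prevA = c ↔ c = prevB)) →
    0 ≤ cnt → cnt ≤ (i : Int) →
    allsum.length = 26 → allcnt.length = 26 → per.length = 26 →
    (∀ r, r < 26 → pvTree (fun x => x) l (per.getD r []) (allsum.getD r [])
        ∧ pvTree (fun _ => 1) l (per.getD r []) (allcnt.getD r [])
        ∧ ∀ x ∈ per.getD r [], 1 ≤ x ∧ x ≤ (i : Int)) →
    pvGo l rest i allsum allcnt prevA cnt res = pvGoB rest i per prevB cnt res := by
  intro rest
  induction rest with
  | nil => intro i per allsum allcnt prevA prevB cnt res _ _ _ _ _ _ _ _ _; rfl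
  | cons c rest' IH =>
    intro i per allsum allcnt prevA prevB cnt res hlen hchars hprev hc0 hci hAS hAC hP hrows
    obtain ⟨h71, h122⟩ := hchars c (by simp)
    have hr : pvRow c < 26 := pvRow_lt c h71 h122
    obtain ⟨hS, hC, hrb⟩ := hrows (pvRow c) hr
    have hcnt' : (if prevA = c then cnt + 1 else 1) = (if c = prevB then cnt + 1 else 1) := by
      by_cases hpa : prevA = c
      · rw [if_pos hpa, if_pos ((hprev c (by simp)).mp hpa)]
      · rw [if_neg hpa, if_neg (fun h => hpa ((hprev c (by simp)).mpr h))]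
    simp only [pvGo, pvGoB]
    rw [hcnt', pvRowGet allsum c [] hAS h71 h122, pvRowGet allcnt c [] hAC h71 h122,
      pvRowGet per c [] hP h71 h122]
    simp only [Option.getD_some]
    have hpos : ∀ x ∈ per.getD (pvRow c) [], 1 ≤ x := fun x hx => (hrb x hx).1
    have hb' : ∀ x ∈ per.getD (pvRow c) [], 1 ≤ x ∧ x ≤ (l : Int) := by
      intro x hx
      refine ⟨(hrb x hx).1, le_trans (hrb x hx).2 ?_⟩
      exact_mod_cast Nat.le_of_lt_succ (by omega)
    have h1le : (1 : Int) ≤ (if c = prevB then cnt + 1 else 1) := by split <;> omega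
    have hup : (if c = prevB then cnt + 1 else 1) ≤ (i : Int) + 1 := by split <;> omega
    generalize hcg : (if c = prevB then cnt + 1 else 1) = cntN at *
    have hm1 : 1 ≤ cntN.toNat := by omega
    have hml : cntN.toNat ≤ l := by
      have : i + 1 ≤ l := by simp at hlen; omega
      omega
    have hcast : ((cntN.toNat : Nat) : Int) = cntN := Int.toNat_of_nonneg (by omega)
    rw [pvLoop1_eq l (per.getD (pvRow c) []) _ _ cntN hS hC hpos cntN.toNat hml,
      pvLoop2_eq l (per.getD (pvRow c) []) _ cntN hC hpos l (le_refl l)]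
    rw [← hcast]
    simp only [Int.toNat_natCast]
    rw [pvRowSet allsum _ c hAS h71 h122, pvRowSet allcnt _ c hAC h71 h122,
      pvRowSet per _ c hP h71 h122]
    have htrees := pvLoop3_tree l (per.getD (pvRow c) []) _ _ cntN.toNat hm1 hml hS hC
    have hres : res + (((i : Int) * ((i : Int) + 1)) / 2
          - pvW (fun x => x) (per.getD (pvRow c) []) cntN.toNat
          + ((cntN.toNat : Nat) : Int) * pvW (fun _ => 1) (per.getD (pvRow c) []) cntN.toNat
          - ((cntN.toNat : Nat) : Int) * pvW (fun _ => 1) (per.getD (pvRow c) []) l)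
        = res + ((i : Int) * ((i : Int) + 1)) / 2
          - ((per.getD (pvRow c) []).map (fun x => min x ((cntN.toNat : Nat) : Int))).sum := by
      rw [pvSumMin (per.getD (pvRow c) []) l cntN.toNat hm1 hml hb']
      ring
    rw [hres]
    apply IH (i + 1)
    · simp at hlen ⊢; omega
    · exact fun d hd => hchars d (by simp [hd])
    · exact fun d hd => ⟨fun h => h.symm, fun h => h.symm⟩
    · omega
    · push_cast; omega
    · simp [hAS]
    · simp [hAC]
    · simp [hP]
    · intro r' hr'
      by_cases hrr : r' = pvRow c
      · subst hrr
        rw [getD_set_lem _ _ _ _ _ (by omega), getD_set_lem _ _ _ _ _ (by omega),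
          getD_set_lem _ _ _ _ _ (by omega), if_pos rfl, if_pos rfl, if_pos rfl]
        refine ⟨htrees.1, htrees.2, ?_⟩
        intro x hx
        rcases List.mem_append.mp hx with hx1 | hx2
        · have := hrb x hx1
          constructor
          · omega
          · push_cast; omega
        · have : x = ((cntN.toNat : Nat) : Int) := by simpa using hx2
          subst this
          constructor
          · exact_mod_cast hm1
          · push_cast at hcast ⊢; omega
      · rw [getD_set_lem _ _ _ _ _ (by omega), getD_set_lem _ _ _ _ _ (by omega),
          getD_set_lem _ _ _ _ _ (by omega), if_neg (fun h => hrr h.symm),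
          if_neg (fun h => hrr h.symm), if_neg (fun h => hrr h.symm)]
        obtain ⟨t1, t2, t3⟩ := hrows r' hr'
        refine ⟨t1, t2, ?_⟩
        intro x hx
        have := t3 x hx
        constructor
        · omega
        · push_cast; omega

-- ===== VERDICT (by name: the statement is the Claim_ definition above) =====
theorem solution_spec : Claim_equal_solution := by
  intro s _ hpre
  have hpre' : ∀ c ∈ s.toList, 71 ≤ c.toNat ∧ c.toNat ≤ 122 := by
    intro c hc
    simpa using List.all_eq_true.mp hpre c hc
  unfold Spec_solution solution solution_alt
  apply pvGo_eq
  · simp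
  · exact hpre'
  · intro c hc
    have h71 := (hpre' c hc).1
    constructor
    · intro h
      exfalso
      have : c.toNat = 48 := by rw [← h]; rfl
      omega
    · intro h
      exfalso
      have : c.toNat = 0 := by rw [h]; rfl
      omega
  · omega
  · simp
  · simp
  · simp
  · simp
  · intro r hr
    simp only [List.getD_eq_getElem?_getD, List.getElem?_replicate, if_pos hr, Option.getD_some]
    exact ⟨pvTree_nil _ _, pvTree_nil _ _, by simp⟩
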